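-- pv_equiv track=rewrite | github.com/reza-asad/3DSSR | models/SVDRank/run_SVDRank.py | map_cat_to_objects
-- ===== SOURCE A (Python) =====
-- def map_cat_to_objects(query_cats, target_graph, target_node, with_cat_predictions=False):
--     cat_to_objects = {cat: [] for cat in query_cats}
--     for node, node_info in target_graph.items():
--         if node != target_node:
--             if with_cat_predictions:
--                 target_cat = node_info['category_predicted'][0]
--             else:
--                 target_cat = node_info['category'][0]
--             if target_cat in cat_to_objects:
--                 cat_to_objects[target_cat].append(node)
--
--     return cat_to_objects
-- ===== SOURCE B (Python) =====
-- def map_cat_to_objects(query_cats, target_graph, target_node, with_cat_predictions=False):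
--     key = 'category_predicted' if with_cat_predictions else 'category'
--     return {cat: [node for node, node_info in target_graph.items()
--                   if node != target_node and node_info[key][0] == cat]
--             for cat in query_cats}
-- ===== Notes on version B (the rewrite author's own statement) =====
-- stated objective: alternative
-- what changed: B replaces A's single pass with bucket-appends into a pre-initialised dict by a dict comprehension over query_cats that, for each category, rescans target_graph and collects the matching nodes directly.
import Mathlib
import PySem

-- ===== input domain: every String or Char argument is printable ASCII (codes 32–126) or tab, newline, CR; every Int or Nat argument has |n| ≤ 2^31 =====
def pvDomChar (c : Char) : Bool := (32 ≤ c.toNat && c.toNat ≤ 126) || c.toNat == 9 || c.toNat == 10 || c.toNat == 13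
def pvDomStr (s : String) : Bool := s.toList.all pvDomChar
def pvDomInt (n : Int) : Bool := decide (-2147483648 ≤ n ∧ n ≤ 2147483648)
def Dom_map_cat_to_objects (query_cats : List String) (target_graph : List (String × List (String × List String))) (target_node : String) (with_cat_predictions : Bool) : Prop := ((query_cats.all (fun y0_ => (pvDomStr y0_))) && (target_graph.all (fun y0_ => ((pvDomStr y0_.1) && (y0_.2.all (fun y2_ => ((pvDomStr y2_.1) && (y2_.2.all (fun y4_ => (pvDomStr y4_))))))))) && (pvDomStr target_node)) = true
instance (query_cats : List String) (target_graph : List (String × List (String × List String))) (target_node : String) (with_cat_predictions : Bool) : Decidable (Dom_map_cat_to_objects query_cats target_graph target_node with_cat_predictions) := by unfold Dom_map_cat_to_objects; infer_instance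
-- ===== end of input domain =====

-- B groups nodes per category by rescanning the graph (dict comprehension) instead of A's
-- single pass with bucket appends: an alternative decomposition, not faster.

-- ===== PORT A =====
-- node_info['category…'][0]: dict lookup (first match) then index 0; `none` is where Python raises.
def map_cat_to_objects (query_cats : List String) (target_graph : List (String × List (String × List String))) (target_node : String) (with_cat_predictions : Bool) : List (String × List String) :=
  let cat_to_objects : PySem.Dict String (List String) :=
    query_cats.foldl (fun d cat => d.insert cat ([] : List String)) PySem.Dict.empty
  let final : PySem.Dict String (List String) :=
    target_graph.foldl (fun d p =>
      if p.1 ≠ target_node then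
        match (if with_cat_predictions then p.2.lookup "category_predicted"
               else p.2.lookup "category").bind (fun l => PySem.List.pyGet? l 0) with
        | none => d        -- Python raises KeyError/IndexError here; excluded by Pre_
        | some target_cat =>
          if d.contains target_cat then d.modify target_cat [] (fun v => v ++ [p.1]) else d
      else d) cat_to_objects
  final.items

-- ===== PORT B =====
def map_cat_to_objects_alt (query_cats : List String) (target_graph : List (String × List (String × List String))) (target_node : String) (with_cat_predictions : Bool) : List (String × List String) :=
  let key : String := if with_cat_predictions then "category_predicted" else "category"
  (query_cats.foldl (fun d cat =>
      d.insert cat ((target_graph.filter (fun p =>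
        p.1 != target_node &&
          ((p.2.lookup key).bind (fun l => PySem.List.pyGet? l 0) == some cat))).map (fun p => p.1)))
    PySem.Dict.empty).items

-- ===== PRECONDITION & SPEC =====
-- Pre_ excludes exactly the inputs where Python A raises: a non-target node whose info lacks the
-- selected category key or maps it to an empty list (node_info[key][0] raises KeyError/IndexError).
def Pre_map_cat_to_objects (query_cats : List String) (target_graph : List (String × List (String × List String))) (target_node : String) (with_cat_predictions : Bool) : Prop :=
  ∀ p ∈ target_graph, p.1 ≠ target_node →
    ((p.2.lookup (if with_cat_predictions then "category_predicted" else "category")).getD []) ≠ []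
instance (query_cats : List String) (target_graph : List (String × List (String × List String))) (target_node : String) (with_cat_predictions : Bool) : Decidable (Pre_map_cat_to_objects query_cats target_graph target_node with_cat_predictions) := by unfold Pre_map_cat_to_objects; infer_instance
def pvWitness_map_cat_to_objects : List String × (List (String × List (String × List String))) × String × Bool :=
  (["chair", "table"], [("n1", [("category", ["chair"])]), ("n2", [("category", ["sofa"])])], "n0", false)

def Spec_map_cat_to_objects (query_cats : List String) (target_graph : List (String × List (String × List String))) (target_node : String) (with_cat_predictions : Bool) (out : List (String × List String)) : Prop := out = map_cat_to_objects_alt query_cats target_graph target_node with_cat_predictions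
instance (query_cats : List String) (target_graph : List (String × List (String × List String))) (target_node : String) (with_cat_predictions : Bool) (out : List (String × List String)) : Decidable (Spec_map_cat_to_objects query_cats target_graph target_node with_cat_predictions out) := by unfold Spec_map_cat_to_objects; infer_instance

-- ===== CLAIM (what is proved, stated in full; the proofs are below) =====
def Claim_equal_map_cat_to_objects : Prop := ∀ (query_cats : List String) (target_graph : List (String × List (String × List String))) (target_node : String) (with_cat_predictions : Bool), Dom_map_cat_to_objects query_cats target_graph target_node with_cat_predictions → Pre_map_cat_to_objects query_cats target_graph target_node with_cat_predictions → Spec_map_cat_to_objects query_cats target_graph target_node with_cat_predictions (map_cat_to_objects query_cats target_graph target_node with_cat_predictions)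
-- ===== LEMMAS AND PROOFS =====

-- A's graph loop never changes the key set.
theorem keysA (tg : List (String × List (String × List String))) (tn : String)
    (f : String × List (String × List String) → Option String)
    (d : PySem.Dict String (List String)) :
    (tg.foldl (fun d p =>
      if p.1 ≠ tn then
        match f p with
        | none => d
        | some tc => if d.contains tc then d.modify tc [] (fun v => v ++ [p.1]) else d
      else d) d).keys = d.keys := by
  induction tg generalizing d with
  | nil => rfl
  | cons p t ih =>
    simp only [List.foldl_cons]
    split
    · cases hf : f p with
      | none => simp only [hf]; exact ih d
      | some tc =>
        simp only [hf]
        split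
        · rw [ih, PySem.Dict.keys_modify]
          exact PySem.Dict.keys_insert_of_contains d _ ‹_›
        · exact ih d
    · exact ih d

-- A's graph loop appends to bucket `cat` exactly the non-target nodes whose category is `cat`.
theorem getDA (tg : List (String × List (String × List String))) (tn : String)
    (f : String × List (String × List String) → Option String)
    (cat : String) (d : PySem.Dict String (List String)) (hc : d.contains cat = true) :
    (tg.foldl (fun d p =>
      if p.1 ≠ tn then
        match f p with
        | none => d
        | some tc => if d.contains tc then d.modify tc [] (fun v => v ++ [p.1]) else d
      else d) d).getD cat []
    = d.getD cat [] ++ (tg.filter (fun p => p.1 != tn && (f p == some cat))).map (fun p => p.1) := by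
  induction tg generalizing d with
  | nil => simp
  | cons p t ih =>
    simp only [List.foldl_cons, List.filter_cons]
    by_cases hp : p.1 = tn
    · have h1 : (if p.1 ≠ tn then
          match f p with
          | none => d
          | some tc => if d.contains tc = true then d.modify tc [] (fun v => v ++ [p.1]) else d
        else d) = d := by simp [hp]
      rw [h1, ih d hc]
      simp [hp]
    · rw [if_pos (hp : p.1 ≠ tn)]
      cases hf : f p with
      | none =>
        simp only [hf]
        rw [ih d hc]
        simp
      | some tc =>
        simp only [hf]
        by_cases hct : d.contains tc = true
        · have hc' : (d.modify tc [] (fun v => v ++ [p.1])).contains cat = true := by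
            rw [PySem.Dict.contains_modify]; simp [hc]
          rw [if_pos hct, ih _ hc']
          by_cases he : tc = cat
          · subst he
            rw [PySem.Dict.getD_modify_self]
            simp [hp, List.append_assoc]
          · rw [PySem.Dict.getD_modify_of_ne d _ _ (fun h => he h.symm)]
            simp [hp, he]
        · have hne : tc ≠ cat := by
            intro h; subst h; exact hct hc
          rw [if_neg hct, ih d hc]
          simp [hp, hne]

-- B's loop (and A's initialisation, with val = const []) as a lookup.
theorem getDB (qcs : List String) (val : String → List String)
    (d : PySem.Dict String (List String)) (cat : String) :
    (qcs.foldl (fun d c => d.insert c (val c)) d).getD cat []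
    = if cat ∈ qcs then val cat else d.getD cat [] := by
  induction qcs generalizing d with
  | nil => simp
  | cons c t ih =>
    simp only [List.foldl_cons, ih, List.mem_cons]
    by_cases hct : cat ∈ t
    · simp [hct]
    · by_cases he : cat = c
      · subst he; simp [hct, PySem.Dict.getD_insert_self]
      · have h2 := PySem.Dict.getD_insert_of_ne d (val c) ([] : List String) he
        simp [hct, he, h2]

theorem keysB (qcs : List String) (val : String → List String) :
    (qcs.foldl (fun d c => d.insert c (val c)) PySem.Dict.empty).keys = PySem.Set.ofList qcs := by
  rw [PySem.Dict.keys_foldl_insert]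
  rfl

-- Main equality of the two dicts' item lists, for an abstract category selector f.
theorem items_eq (qcs : List String) (tg : List (String × List (String × List String)))
    (tn : String) (f : String × List (String × List String) → Option String) :
    (tg.foldl (fun d p =>
      if p.1 ≠ tn then
        match f p with
        | none => d
        | some tc => if d.contains tc then d.modify tc [] (fun v => v ++ [p.1]) else d
      else d) (qcs.foldl (fun d cat => d.insert cat ([] : List String)) PySem.Dict.empty)).items
    = (qcs.foldl (fun d cat =>
        d.insert cat ((tg.filter (fun p => p.1 != tn && (f p == some cat))).map (fun p => p.1)))
       PySem.Dict.empty).items := by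
  set init := qcs.foldl (fun d cat => d.insert cat ([] : List String)) PySem.Dict.empty with hinit
  set final := tg.foldl (fun d p =>
      if p.1 ≠ tn then
        match f p with
        | none => d
        | some tc => if d.contains tc then d.modify tc [] (fun v => v ++ [p.1]) else d
      else d) init with hfinal
  set bdict := qcs.foldl (fun d cat =>
        d.insert cat ((tg.filter (fun p => p.1 != tn && (f p == some cat))).map (fun p => p.1)))
       PySem.Dict.empty with hb
  have hkA : final.keys = PySem.Set.ofList qcs := by
    rw [hfinal, keysA, hinit, keysB qcs (fun _ => [])]
  have hkB : bdict.keys = PySem.Set.ofList qcs := by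
    rw [hb]; exact keysB qcs _
  have hndA : final.keys.Nodup := by rw [hkA]; exact PySem.Set.nodup_ofList qcs
  have hndB : bdict.keys.Nodup := by rw [hkB]; exact PySem.Set.nodup_ofList qcs
  rw [PySem.Dict.items_eq_map_keys final hndA [], PySem.Dict.items_eq_map_keys bdict hndB [],
    hkA, hkB]
  apply List.map_congr_left
  intro cat hcat
  have hmem : cat ∈ qcs := (PySem.Set.mem_ofList qcs cat).mp hcat
  have hcont : init.contains cat = true := by
    rw [PySem.Dict.contains_iff_mem_keys, hinit, keysB qcs (fun _ => [])]
    exact (PySem.Set.mem_ofList qcs cat).mpr hmem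
  have hA : final.getD cat [] = (tg.filter (fun p => p.1 != tn && (f p == some cat))).map (fun p => p.1) := by
    rw [hfinal, getDA tg tn f cat init hcont, hinit, getDB qcs (fun _ => [])]
    simp [hmem]
  have hB : bdict.getD cat [] = (tg.filter (fun p => p.1 != tn && (f p == some cat))).map (fun p => p.1) := by
    rw [hb, getDB]; simp [hmem]
  rw [hA, hB]

-- ===== VERDICT (by name: the statement is the Claim_ definition above) =====
theorem map_cat_to_objects_spec : Claim_equal_map_cat_to_objects := by
  intro qcs tg tn flag _ _
  unfold Spec_map_cat_to_objects map_cat_to_objects map_cat_to_objects_alt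
  cases flag
  · simpa using (items_eq qcs tg tn
      (fun p => (p.2.lookup "category").bind (fun l => PySem.List.pyGet? l 0)))
  · simpa using (items_eq qcs tg tn
      (fun p => (p.2.lookup "category_predicted").bind (fun l => PySem.List.pyGet? l 0)))
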